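-- pv_equiv track=rewrite | github.com/lucaslopes/hedonic | scripts/robustness/partitions.py | normalize_membership
-- ===== SOURCE A (Python) =====
-- def normalize_membership(partitions):
--     """
--     Normalize partitions by sorting the labels to ensure uniqueness.
--
--     Args:
--         partitions (list of list): The partitions in membership format.
--
--     Returns:
--         list of list: The normalized partitions.
--     """
--     normalized_partitions = []
--     for partition in partitions:
--         label_map = {}
--         new_label = 0
--         normalized_partition = []
--         for label in partition:
--             if label not in label_map:
--                 label_map[label] = new_label
--                 new_label += 1
--             normalized_partition.append(label_map[label])
--         normalized_partitions.append(normalized_partition)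
--     return normalized_partitions
-- ===== SOURCE B (Python) =====
-- def normalize_membership(partitions):
--     """Normalize partitions: each label's normalized value is computed independently
--     as the number of distinct labels strictly before its first occurrence."""
--     return [[len(set(p[:p.index(x)])) for x in p] for p in partitions]
-- ===== Notes on version B (the rewrite author's own statement) =====
-- stated objective: alternative
-- what changed: Drops A's incremental label table (dict + running counter, one interleaved discover-and-emit loop) entirely: B computes each element's label independently and table-free as len(set(p[:p.index(x)])), the count of distinct labels before the element's first occurrence.
import Mathlib
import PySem

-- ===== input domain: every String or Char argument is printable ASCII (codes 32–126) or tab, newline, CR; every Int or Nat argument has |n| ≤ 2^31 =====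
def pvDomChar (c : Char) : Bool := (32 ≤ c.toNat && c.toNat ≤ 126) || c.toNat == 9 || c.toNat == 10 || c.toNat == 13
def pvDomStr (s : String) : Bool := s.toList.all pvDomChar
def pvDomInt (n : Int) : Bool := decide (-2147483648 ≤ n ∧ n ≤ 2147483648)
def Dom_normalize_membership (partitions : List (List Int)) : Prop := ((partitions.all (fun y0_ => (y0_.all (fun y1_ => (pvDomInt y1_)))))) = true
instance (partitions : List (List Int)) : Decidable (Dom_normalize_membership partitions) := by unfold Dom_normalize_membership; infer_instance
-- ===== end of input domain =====

-- B drops A's incremental label table entirely: each element's normalized label is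
-- computed independently as the number of distinct labels strictly before its first
-- occurrence, len(set(p[:p.index(x)])); objective: alternative (O(n^2) per partition
-- instead of A's O(n), but table-free and per-element independent).

-- ===== PORT A =====
-- inner loop of A: state (label_map, new_label, normalized_partition)
def nmStepA (st : PySem.Dict Int Int × Int × List Int) (label : Int) :
    PySem.Dict Int Int × Int × List Int :=
  let mn : PySem.Dict Int Int × Int :=
    if st.1.contains label then (st.1, st.2.1) else (st.1.insert label st.2.1, st.2.1 + 1)
  (mn.1, mn.2, st.2.2 ++ [mn.1.getD label 0])

def normalize_membership (partitions : List (List Int)) : List (List Int) :=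
  partitions.foldl
    (fun normalized_partitions partition =>
      normalized_partitions ++ [(partition.foldl nmStepA (PySem.Dict.empty, 0, [])).2.2])
    []

-- ===== PORT B =====
-- per-element label of B: len(set(p[:p.index(x)])).  p.index(x) is ported with
-- PySem.List.index?; the none branch (Python's ValueError) is unreachable since x is
-- always drawn from p itself.
def nmLabelB (p : List Int) (x : Int) : Int :=
  match PySem.List.index? p x with
  | some i => PySem.Set.len (PySem.Set.ofList (PySem.List.slice p none (some (i : Int))))
  | none => 0

def normalize_membership_alt (partitions : List (List Int)) : List (List Int) :=
  partitions.map (fun p => p.map (nmLabelB p))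

-- ===== PRECONDITION & SPEC =====
def Spec_normalize_membership (partitions : List (List Int)) (out : List (List Int)) : Prop := out = normalize_membership_alt partitions
instance (partitions : List (List Int)) (out : List (List Int)) : Decidable (Spec_normalize_membership partitions out) := by unfold Spec_normalize_membership; infer_instance

-- ===== CLAIM (what is proved, stated in full; the proofs are below) =====
def Claim_equal_normalize_membership : Prop := ∀ (partitions : List (List Int)), Dom_normalize_membership partitions → Spec_normalize_membership partitions (normalize_membership partitions)

-- ===== LEMMAS AND PROOFS =====

-- Set.update only appends: Set.update s l = s ++ t for some tail t
lemma update_eq_append (l s : List Int) : ∃ t, PySem.Set.update s l = s ++ t := by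
  induction l generalizing s with
  | nil => exact ⟨[], by simp [PySem.Set.update]⟩
  | cons x l ih =>
    rcases ih (PySem.Set.add s x) with ⟨t, ht⟩
    by_cases hx : x ∈ s
    · exact ⟨t, by simpa [PySem.Set.update_cons, PySem.Set.add_of_mem hx] using ht⟩
    · exact ⟨x :: t, by simpa [PySem.Set.update_cons, PySem.Set.add_of_not_mem hx] using ht⟩

-- idxOf is stable under Set.update for existing members
lemma idxOf_update_of_mem (l s : List Int) (x : Int) (hx : x ∈ s) :
    (PySem.Set.update s l).idxOf x = s.idxOf x := by
  rcases update_eq_append l s with ⟨t, ht⟩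
  rw [ht, List.idxOf_append_of_mem hx]

-- invariant of A's inner loop: with label_map represented by `seen` (the distinct labels
-- in first-occurrence order), the loop emits the index of each label in the final table
lemma foldA_invariant (rest : List Int) :
    ∀ (seen : List Int) (m : PySem.Dict Int Int) (acc : List Int),
    seen.Nodup →
    (∀ x, m.get? x = if x ∈ seen then some ((seen.idxOf x : Nat) : Int) else none) →
    (rest.foldl nmStepA (m, (seen.length : Int), acc)).2.2
      = acc ++ rest.map (fun x => ((PySem.Set.update seen rest).idxOf x : Int)) := by
  induction rest with
  | nil => intro seen m acc _ _; simp [PySem.Set.update]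
  | cons x rest ih =>
    intro seen m acc hnd hm
    have hcont : m.contains x = decide (x ∈ seen) := by
      rw [PySem.Dict.contains_eq_isSome_get?, hm x]
      by_cases h : x ∈ seen <;> simp [h]
    simp only [List.foldl_cons, nmStepA, PySem.Set.update_cons]
    by_cases hx : x ∈ seen
    · have hget : m.getD x 0 = ((seen.idxOf x : Nat) : Int) := by
        rw [PySem.Dict.getD_eq_get?_getD, hm x]; simp [hx]
      simp only [hcont, hx, decide_true, if_true]
      rw [ih seen m _ hnd hm, PySem.Set.add_of_mem hx]
      simp [idxOf_update_of_mem rest seen x hx, hget]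
    · have hnd' : (seen ++ [x]).Nodup := by
        simp [List.nodup_append, hnd]
        exact fun a ha h => hx (h ▸ ha)
      have hm' : ∀ y, (m.insert x (seen.length : Int)).get? y
          = if y ∈ seen ++ [x] then some (((seen ++ [x]).idxOf y : Nat) : Int) else none := by
        intro y
        by_cases hyx : y = x
        · subst hyx
          rw [PySem.Dict.get?_insert_self]
          simp [List.idxOf_append, hx]
        · rw [PySem.Dict.get?_insert_of_ne _ _ hyx, hm y]
          by_cases hy : y ∈ seen
          · simp [hy, List.idxOf_append_of_mem hy]
          · simp [hy, hyx]
      have hgetx : (m.insert x (seen.length : Int)).getD x 0 = (seen.length : Int) := by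
        rw [PySem.Dict.getD_eq_get?_getD, PySem.Dict.get?_insert_self]; rfl
      simp only [hcont, hx, decide_false, Bool.false_eq_true, if_false]
      have hlen : ((seen ++ [x]).length : Int) = (seen.length : Int) + 1 := by simp
      rw [PySem.Set.add_of_not_mem hx, ← hlen, ih (seen ++ [x]) _ _ hnd' hm']
      have hxm : x ∈ seen ++ [x] := by simp
      rw [hgetx]
      simp [idxOf_update_of_mem rest (seen ++ [x]) x hxm, List.idxOf_append, hx]

-- A's inner loop emits, for each element, its first-occurrence rank
lemma innerA_eq (p : List Int) :
    (p.foldl nmStepA (PySem.Dict.empty, 0, [])).2.2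
      = p.map (fun x => ((PySem.Set.ofList p).idxOf x : Int)) := by
  have h0 : ((0 : Int)) = (([] : List Int).length : Int) := by simp
  rw [h0, foldA_invariant p [] PySem.Dict.empty [] (by simp) (by simp [PySem.Dict.get?_empty])]
  simp [PySem.Set.update_nil_left]

-- B-side core: the number of distinct labels before the first occurrence of x equals
-- x's index in the distinct-labels-in-first-occurrence-order list (generalized over an
-- accumulator set s not containing x)
lemma distinct_prefix_count (p : List Int) :
    ∀ (s : List Int) (x : Int) (j : Nat), x ∉ s → PySem.List.index? p x = some j →
    (PySem.Set.update s (p.take j)).length = (PySem.Set.update s p).idxOf x := by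
  induction p with
  | nil => intro s x j _ hj; rw [PySem.List.index?_eq_idxOf?] at hj; simp at hj
  | cons y t ih =>
    intro s x j hs hj
    by_cases hxy : x = y
    · subst hxy
      rw [PySem.List.index?_cons_self] at hj
      obtain rfl : (0 : Nat) = j := Option.some.inj hj
      rcases update_eq_append t (s ++ [x]) with ⟨u, hu⟩
      show (PySem.Set.update s (List.take 0 (x :: t))).length
          = List.idxOf x (PySem.Set.update s (x :: t))
      rw [List.take_zero]
      show s.length = List.idxOf x (PySem.Set.update s (x :: t))
      rw [PySem.Set.update_cons, PySem.Set.add_of_not_mem hs, hu, List.append_assoc,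
        List.idxOf_append_of_notMem hs]
      simp
    · have hyx : y ≠ x := fun h => hxy h.symm
      rw [PySem.List.index?_cons_of_ne _ hyx] at hj
      rcases Option.map_eq_some_iff.mp hj with ⟨j', hj', rfl⟩
      have hxt : x ∈ t := (PySem.List.index?_isSome_iff t x).mp (by rw [hj']; rfl)
      have hxs' : x ∉ PySem.Set.add s y := by
        by_cases hy : y ∈ s
        · simpa [PySem.Set.add_of_mem hy] using hs
        · simp [PySem.Set.add_of_not_mem hy, hs, hxy]
      simp only [List.take_succ_cons, PySem.Set.update_cons]
      exact ih (PySem.Set.add s y) x j' hxs' hj'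

-- B's per-element label is the first-occurrence rank
lemma nmLabelB_eq (p : List Int) (x : Int) (hx : x ∈ p) :
    nmLabelB p x = ((PySem.Set.ofList p).idxOf x : Int) := by
  obtain ⟨j, hj⟩ := Option.isSome_iff_exists.mp ((PySem.List.index?_isSome_iff p x).mpr hx)
  unfold nmLabelB
  rw [hj]
  show PySem.Set.len (PySem.Set.ofList (PySem.List.slice p none (some (j : Int))))
      = ((PySem.Set.ofList p).idxOf x : Int)
  rw [PySem.List.slice_to_natCast]
  have h := distinct_prefix_count p [] x j (by simp) hj
  rw [PySem.Set.update_nil_left, PySem.Set.update_nil_left] at h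
  simp [PySem.Set.len, h]

-- ===== VERDICT (by name: the statement is the Claim_ definition above) =====
theorem normalize_membership_spec : Claim_equal_normalize_membership := by
  intro partitions _
  unfold Spec_normalize_membership normalize_membership normalize_membership_alt
  rw [PySem.List.foldl_append_singleton_eq_map]
  refine List.map_congr_left fun p _ => ?_
  rw [innerA_eq]
  exact List.map_congr_left fun x hx => (nmLabelB_eq p x hx).symm
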